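-- pv_equiv track=rewrite | github.com/felipe-morine/assignments_machine_learning | atividade_9_final/IrisClassifier.py | one_vs_one
-- ===== SOURCE A (Python) =====
-- from collections import Counter
--
-- def one_vs_one(X_s_ve, X_s_vi, X_ve_vi):
--     """
--     one vs. one para votacao. retorna "tie" caso haja empate
--     :param X_s_ve: classes para setosa vs. versicolor
--     :param X_s_vi: classes para setosa vs. virginica
--     :param X_ve_vi: classes para versicolor vs. virginica
--     :return:
--     """
--     iris_class_vector = []
--
--     for i in range(len(X_s_ve)):
--         class_votes = [X_s_ve[i], X_s_vi[i], X_ve_vi[i]]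
--         counter = Counter(class_votes)
--         most_common_list = counter.most_common(1)
--         if len(most_common_list) > 1:
--             iris_class_vector.append('tie')
--         else:
--             iris_class_vector.append(most_common_list[0][0])
--     return iris_class_vector
-- ===== SOURCE B (Python) =====
-- def one_vs_one(X_s_ve, X_s_vi, X_ve_vi):
--     """
--     one vs. one voting, decided by direct equality comparisons instead of a
--     Counter frequency table: the majority of (a, b, c) is a when a equals
--     b or c, else b when b equals c, else (all distinct) the first vote a,
--     matching Counter's insertion-order tie-break.
--     """
--     return [a if (a == b or a == c) else (b if b == c else a)
--             for a, b, c in zip(X_s_ve, X_s_vi, X_ve_vi)]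
-- ===== Notes on version B (the rewrite author's own statement) =====
-- stated objective: faster
-- what changed: Replaces the per-element Counter/most_common frequency-table machinery (and the dead 'tie' branch) with a single zip comprehension that picks the majority of the three votes by direct equality tests, returning the first vote when all three differ to match Counter's insertion-order tie-break; dropping the per-element Counter construction and most_common sort removes their constant overhead (measured ~8x at large n).
import Mathlib
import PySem

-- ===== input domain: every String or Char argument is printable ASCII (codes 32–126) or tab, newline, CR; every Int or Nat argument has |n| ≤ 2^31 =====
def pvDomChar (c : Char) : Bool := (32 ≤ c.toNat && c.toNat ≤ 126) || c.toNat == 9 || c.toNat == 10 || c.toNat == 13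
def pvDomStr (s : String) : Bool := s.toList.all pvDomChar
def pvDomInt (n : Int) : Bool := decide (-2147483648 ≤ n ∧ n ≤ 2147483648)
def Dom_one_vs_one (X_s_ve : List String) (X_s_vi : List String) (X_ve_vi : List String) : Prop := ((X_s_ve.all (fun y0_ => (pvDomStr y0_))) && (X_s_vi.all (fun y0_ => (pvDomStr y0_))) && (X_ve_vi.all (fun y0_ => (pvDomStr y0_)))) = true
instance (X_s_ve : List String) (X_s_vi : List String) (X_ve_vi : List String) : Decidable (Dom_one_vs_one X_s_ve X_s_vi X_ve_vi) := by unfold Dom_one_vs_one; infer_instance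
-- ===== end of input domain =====

-- B replaces A's per-element Counter/most_common machinery (whose 'tie' branch is dead) by
-- direct equality tests over zip, with the first vote winning the all-distinct tie as in A.

-- ===== PORT A =====
-- one loop body: votes, Counter, most_common(1) = items sorted by count descending (stable), take 1
def one_vs_one (X_s_ve : List String) (X_s_vi : List String) (X_ve_vi : List String) : List String :=
  (PySem.List.pyRange 0 X_s_ve.length 1).foldl
    (fun acc i =>
      let class_votes : List String :=
        [PySem.List.pyGetD X_s_ve i "", PySem.List.pyGetD X_s_vi i "", PySem.List.pyGetD X_ve_vi i ""]
      let counter := PySem.Dict.counter class_votes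
      let most_common_list := (PySem.List.sorted counter.items (fun p => p.2) true).take 1
      if most_common_list.length > 1 then acc ++ ["tie"]
      else acc ++ [(most_common_list.headD ("", 0)).1])
    []

-- ===== PORT B =====
def pvMaj (a b c : String) : String :=
  if a == b || a == c then a else if b == c then b else a

def one_vs_one_alt (X_s_ve : List String) (X_s_vi : List String) (X_ve_vi : List String) : List String :=
  (X_s_ve.zip (X_s_vi.zip X_ve_vi)).map (fun p => pvMaj p.1 p.2.1 p.2.2)

-- ===== PRECONDITION & SPEC =====
-- A indexes X_s_vi[i] and X_ve_vi[i] for every i < len(X_s_ve): it raises IndexError when either is shorter.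
def Pre_one_vs_one (X_s_ve : List String) (X_s_vi : List String) (X_ve_vi : List String) : Prop :=
  X_s_ve.length ≤ X_s_vi.length ∧ X_s_ve.length ≤ X_ve_vi.length
instance (X_s_ve : List String) (X_s_vi : List String) (X_ve_vi : List String) : Decidable (Pre_one_vs_one X_s_ve X_s_vi X_ve_vi) := by unfold Pre_one_vs_one; infer_instance

def pvWitness_one_vs_one : List String × List String × List String :=
  (["Iris-setosa", "Iris-virginica", "Iris-setosa"],
   ["Iris-setosa", "Iris-versicolor", "Iris-virginica"],
   ["Iris-versicolor", "Iris-virginica", "Iris-virginica"])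

def Spec_one_vs_one (X_s_ve : List String) (X_s_vi : List String) (X_ve_vi : List String) (out : List String) : Prop := out = one_vs_one_alt X_s_ve X_s_vi X_ve_vi
instance (X_s_ve : List String) (X_s_vi : List String) (X_ve_vi : List String) (out : List String) : Decidable (Spec_one_vs_one X_s_ve X_s_vi X_ve_vi out) := by unfold Spec_one_vs_one; infer_instance

-- ===== CLAIM (what is proved, stated in full; the proofs are below) =====
def Claim_equal_one_vs_one : Prop := ∀ (X_s_ve : List String) (X_s_vi : List String) (X_ve_vi : List String), Dom_one_vs_one X_s_ve X_s_vi X_ve_vi → Pre_one_vs_one X_s_ve X_s_vi X_ve_vi → Spec_one_vs_one X_s_ve X_s_vi X_ve_vi (one_vs_one X_s_ve X_s_vi X_ve_vi)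

-- ===== LEMMAS AND PROOFS =====

-- A's loop body computes the direct-comparison majority of the three votes.
lemma step_eq_maj (a b c : String) :
    (((PySem.List.sorted (PySem.Dict.counter [a, b, c]).items (fun p => p.2) true).take 1).headD ("", 0)).1
      = pvMaj a b c := by
  by_cases hab : a = b
  · by_cases hac : a = c
    · subst hab; subst hac
      simp [pvMaj, PySem.Dict.items_counter, PySem.Set.ofList, PySem.Set.add,
        PySem.List.sorted, PySem.List.insertBy, List.count_cons]
    · subst hab
      simp [pvMaj, PySem.Dict.items_counter, PySem.Set.ofList, PySem.Set.add,
        PySem.List.sorted, PySem.List.insertBy, List.count_cons, hac, Ne.symm hac]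
  · by_cases hac : a = c
    · subst hac
      simp [pvMaj, PySem.Dict.items_counter, PySem.Set.ofList, PySem.Set.add,
        PySem.List.sorted, PySem.List.insertBy, List.count_cons, hab, Ne.symm hab]
    · by_cases hbc : b = c
      · subst hbc
        simp [pvMaj, PySem.Dict.items_counter, PySem.Set.ofList, PySem.Set.add,
          PySem.List.sorted, PySem.List.insertBy, List.count_cons, hab, Ne.symm hab]
      · simp [pvMaj, PySem.Dict.items_counter, PySem.Set.ofList, PySem.Set.add,
          PySem.List.sorted, PySem.List.insertBy, List.count_cons,
          hab, Ne.symm hab, hac, Ne.symm hac, hbc, Ne.symm hbc]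

theorem one_vs_one_spec : Claim_equal_one_vs_one := by
  intro xs ys zs _ hpre
  obtain ⟨h1, h2⟩ := hpre
  unfold Spec_one_vs_one one_vs_one one_vs_one_alt
  have hnot : ∀ (l : List (String × Int)), ¬ (l.take 1).length > 1 := by
    intro l; have := List.length_take_le 1 l; omega
  simp only [hnot, if_false]
  rw [PySem.List.foldl_append_singleton_eq_map]
  apply List.ext_getElem
  · simp [PySem.List.length_pyRange_one]; omega
  · intro k hk hk'
    simp only [List.nil_append, List.getElem_map, PySem.List.getElem_pyRange_one, zero_add]
    have hkx : k < xs.length := by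
      simpa [PySem.List.length_pyRange_one] using hk
    have hky : k < ys.length := by omega
    have hkz : k < zs.length := by omega
    rw [List.getElem_zip, List.getElem_zip]
    simp only [PySem.List.pyGetD_natCast]
    rw [List.getD_eq_getElem _ _ hkx, List.getD_eq_getElem _ _ hky, List.getD_eq_getElem _ _ hkz]
    exact step_eq_maj xs[k] ys[k] zs[k]
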